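-- pv_equiv track=rewrite | github.com/vaibhav-patel-1211/SEARCH_ORCHESTRATION_ANSWER_ENGINE | app/services/document_ingestion.py | _merge_chunk_sequence
-- ===== SOURCE A (Python) =====
-- CHUNK_OVERLAP = 200
--
-- def _merge_chunk_sequence(chunks: list[str]) -> str:
--     if not chunks:
--         return ""
--
--     merged = chunks[0].strip()
--     for part in chunks[1:]:
--         candidate = part.strip()
--         if not candidate:
--             continue
--
--         max_overlap = min(len(merged), len(candidate), CHUNK_OVERLAP * 2)
--         overlap = 0
--         for size in range(max_overlap, 0, -1):
--             if merged.endswith(candidate[:size]):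
--                 overlap = size
--                 break
--
--         merged = f"{merged}{candidate[overlap:]}"
--
--     return merged.strip()
-- ===== SOURCE B (Python) =====
-- CHUNK_OVERLAP = 200
-- _SENTINEL = "\x00"  # never occurs in the (printable-ASCII + whitespace) input domain
--
--
-- def _prefix_function(s: str) -> list[int]:
--     """Standard KMP failure array: pi[i] = length of the longest proper border of s[:i+1]."""
--     pi = [0] * len(s)
--     k = 0
--     for i in range(1, len(s)):
--         while k > 0 and s[i] != s[k]:
--             k = pi[k - 1]
--         if s[i] == s[k]:
--             k += 1
--         pi[i] = k
--     return pi
--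
--
-- def _merge_chunk_sequence(chunks: list[str]) -> str:
--     if not chunks:
--         return ""
--
--     merged = chunks[0].strip()
--     for part in chunks[1:]:
--         candidate = part.strip()
--         if not candidate:
--             continue
--
--         cap = min(len(merged), len(candidate), CHUNK_OVERLAP * 2)
--         # longest suffix of `merged` that is a prefix of `candidate`, capped at `cap`:
--         # it is the last failure value of prefix ++ sentinel ++ suffix (one linear pass).
--         s = candidate[:cap] + _SENTINEL + merged[len(merged) - cap:]
--         overlap = _prefix_function(s)[-1]
--         merged += candidate[overlap:]
--
--     return merged.strip()
-- ===== Notes on version B (the rewrite author's own statement) =====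
-- stated objective: faster
-- what changed: B replaces A's descending scan that slices candidate[:size] and calls endswith for every size (quadratic in the capped overlap) by a single linear KMP prefix-function pass over candidate[:cap] + '\x00' + merged[-cap:], whose last failure value is exactly the longest capped overlap (the sentinel never occurs in the printable-ASCII domain).
import Mathlib
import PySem

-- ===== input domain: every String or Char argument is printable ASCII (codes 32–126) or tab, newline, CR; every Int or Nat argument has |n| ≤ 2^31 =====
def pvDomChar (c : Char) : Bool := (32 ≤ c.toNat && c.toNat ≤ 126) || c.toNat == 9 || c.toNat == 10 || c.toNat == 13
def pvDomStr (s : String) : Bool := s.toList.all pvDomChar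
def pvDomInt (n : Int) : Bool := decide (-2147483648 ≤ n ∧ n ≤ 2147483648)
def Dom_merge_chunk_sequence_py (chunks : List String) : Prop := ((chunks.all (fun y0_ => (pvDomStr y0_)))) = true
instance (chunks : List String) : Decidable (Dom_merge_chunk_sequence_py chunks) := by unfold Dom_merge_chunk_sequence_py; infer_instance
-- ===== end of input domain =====

-- B replaces A's descending endswith scan (quadratic in the capped overlap) by a linear KMP
-- prefix-function pass over candidate[:cap] + '\x00' + merged[-cap:]; equal to A on the whole domain.

-- ===== PORT A =====
-- A's inner 'for size in range(max_overlap, 0, -1): if merged.endswith(candidate[:size]): overlap = size; break'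
-- (overlap stays 0 when the range is exhausted)
def pv_find_overlap : List Int → String → String → Int
  | [], _, _ => 0
  | size :: rest, merged, candidate =>
      if PySem.Str.endswith merged (PySem.Str.slice candidate none (some size)) then size
      else pv_find_overlap rest merged candidate

-- one iteration of A's outer loop
def pv_merge_step (merged part : String) : String :=
  let candidate := PySem.Str.strip part
  if candidate = "" then merged
  else
    let max_overlap : Int := min (min ((merged.length : Int)) ((candidate.length : Int))) (200 * 2)
    let overlap := pv_find_overlap (PySem.List.pyRange max_overlap 0 (-1)) merged candidate
    merged ++ PySem.Str.slice candidate (some overlap) none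

def merge_chunk_sequence_py (chunks : List String) : String :=
  match chunks with
  | [] => ""
  | c0 :: rest => PySem.Str.strip (rest.foldl pv_merge_step (PySem.Str.strip c0))

-- ===== PORT B =====
-- Source B's 'while k > 0 and s[i] != s[k]: k = pi[k-1]'.  The min-clamp only makes termination
-- evident; it never changes the value, because every prefix-function entry satisfies pi[j] ≤ j
-- (in every reachable state pi.getD (k-1) 0 ≤ k-1, so the min collapses to Python's pi[k-1]).
-- s[i] / s[k] are in range in every reachable state, so getD equals Python's indexing.
def pvFall (s : List Char) (pi : List Nat) (ci : Char) (k : Nat) : Nat :=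
  if k ≠ 0 ∧ ¬ (ci = s.getD k ' ') then
    pvFall s pi ci (min (pi.getD (k - 1) 0) (k - 1))
  else k
  termination_by k
  decreasing_by omega

-- body of Source B's 'for i in range(1, len(s))': fall back, extend on a match, record pi[i] = k
def pvKmpFold (s : List Char) (st : List Nat × Nat) (i : Nat) : List Nat × Nat :=
  let ci := s.getD i ' '
  let k0 := pvFall s st.1 ci st.2
  let k1 := if ci = s.getD k0 ' ' then k0 + 1 else k0
  (st.1 ++ [k1], k1)

-- Source B's _prefix_function (pi built left to right; pi[0] = 0)
def pvPrefixFun (s : List Char) : List Nat :=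
  if s.length = 0 then []
  else ((List.range' 1 (s.length - 1)).foldl (pvKmpFold s) ([0], 0)).1

-- one iteration of Source B's outer loop (all slice indices are nonnegative ints, so take/drop are exact)
def pv_merge_step_alt (merged part : String) : String :=
  let candidate := PySem.Str.strip part
  if candidate = "" then merged
  else
    let cl := candidate.toList
    let ml := merged.toList
    let cap : Nat := min (min ml.length cl.length) (200 * 2)
    let s := cl.take cap ++ '\x00' :: ml.drop (ml.length - cap)
    let overlap := (pvPrefixFun s).getLastD 0      -- pi[-1]; s is nonempty (it contains the sentinel)
    merged ++ String.ofList (cl.drop overlap)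

def merge_chunk_sequence_py_alt (chunks : List String) : String :=
  match chunks with
  | [] => ""
  | c0 :: rest => PySem.Str.strip (rest.foldl pv_merge_step_alt (PySem.Str.strip c0))

-- ===== PRECONDITION & SPEC =====
def Spec_merge_chunk_sequence_py (chunks : List String) (out : String) : Prop := out = merge_chunk_sequence_py_alt chunks
instance (chunks : List String) (out : String) : Decidable (Spec_merge_chunk_sequence_py chunks out) := by unfold Spec_merge_chunk_sequence_py; infer_instance

-- ===== CLAIM (what is proved, stated in full; the proofs are below) =====
def Claim_equal_merge_chunk_sequence_py : Prop := ∀ (chunks : List String), Dom_merge_chunk_sequence_py chunks → Spec_merge_chunk_sequence_py chunks (merge_chunk_sequence_py chunks)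

-- ===== LEMMAS AND PROOFS =====

-- `bordB l k`: the prefix of length k of l is also a suffix of l (k = l.length allowed)
def bordB (l : List Char) (k : Nat) : Bool := k ≤ l.length && l.take k == l.drop (l.length - k)

-- longest PROPER border length of l (0 for [])
def lbord (l : List Char) : Nat := Nat.findGreatest (fun k => bordB l k = true) (l.length - 1)

theorem bordB_iff (l : List Char) (k : Nat) :
    bordB l k = true ↔ k ≤ l.length ∧ l.take k = l.drop (l.length - k) := by
  simp [bordB]

theorem bordB_zero (l : List Char) : bordB l 0 = true := by
  simp [bordB]

-- a shorter border is a border of a longer border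
theorem bord_trans (l : List Char) (j k : Nat) (hjk : j ≤ k)
    (hj : bordB l j = true) (hk : bordB l k = true) : bordB (l.take k) j = true := by
  rw [bordB_iff] at hj hk ⊢
  obtain ⟨hjl, hjeq⟩ := hj
  obtain ⟨hkl, hkeq⟩ := hk
  have hlen : (l.take k).length = k := by simp [List.length_take]; omega
  refine ⟨by omega, ?_⟩
  rw [List.take_take, min_eq_left hjk, hlen, hkeq, List.drop_drop]
  have h2 : (l.length - k) + (k - j) = l.length - j := by omega
  rw [h2, hjeq]

-- a border of a border (taken as a prefix) is a border of the whole
theorem bord_of_take (l : List Char) (j k : Nat)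
    (hj : bordB (l.take k) j = true) (hk : bordB l k = true) : bordB l j = true := by
  rw [bordB_iff] at hj hk ⊢
  obtain ⟨hjl, hjeq⟩ := hj
  obtain ⟨hkl, hkeq⟩ := hk
  have hlen : (l.take k).length = k := by simp [List.length_take]; omega
  rw [hlen] at hjl hjeq
  refine ⟨by omega, ?_⟩
  rw [List.take_take, min_eq_left hjl] at hjeq
  rw [hjeq, hkeq, List.drop_drop]
  congr 1
  omega

theorem bordB_append (l : List Char) (c : Char) (k : Nat) :
    bordB (l ++ [c]) (k + 1) = (bordB l k && (l.getD k c == c)) := by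
  rcases lt_trichotomy k l.length with hlt | heq | hgt
  · rw [Bool.eq_iff_iff, Bool.and_eq_true, beq_iff_eq, bordB_iff, bordB_iff]
    have hlen : (l ++ [c]).length = l.length + 1 := by simp
    have hget : l.getD k c = l[k] := List.getD_eq_getElem l c hlt
    rw [hlen, hget]
    have htake : (l ++ [c]).take (k + 1) = l.take k ++ [l[k]] := by
      rw [List.take_append_of_le_length (by omega), List.take_add_one,
        List.getElem?_eq_getElem hlt]
      rfl
    have hdrop : (l ++ [c]).drop (l.length + 1 - (k + 1)) = l.drop (l.length - k) ++ [c] := by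
      rw [show l.length + 1 - (k + 1) = l.length - k by omega,
        List.drop_append_of_le_length (by omega)]
    rw [htake, hdrop]
    constructor
    · rintro ⟨-, heq2⟩
      obtain ⟨he1, he2⟩ := List.append_inj' heq2 rfl
      exact ⟨⟨by omega, he1⟩, by simpa using he2⟩
    · rintro ⟨⟨-, heq2⟩, hc⟩
      exact ⟨by omega, by rw [heq2, hc]⟩
  · subst heq
    have h1 : bordB (l ++ [c]) (l.length + 1) = true := by
      have := (by simp [bordB] : bordB (l ++ [c]) ((l ++ [c]).length) = true)
      simpa using this
    have h2 : bordB l l.length = true := by simp [bordB]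
    rw [h1, h2, List.getD_eq_default l c le_rfl]
    simp
  · have h1 : bordB (l ++ [c]) (k + 1) = false := by
      rw [bordB, Bool.and_eq_false_iff]
      left; simp; omega
    have h2 : bordB l k = false := by
      rw [bordB, Bool.and_eq_false_iff]
      left; simp; omega
    rw [h1, h2]
    simp

theorem lbord_le (l : List Char) : lbord l ≤ l.length - 1 :=
  Nat.findGreatest_le _

theorem lbord_bord (l : List Char) : bordB l (lbord l) = true := by
  unfold lbord
  exact Nat.findGreatest_spec (P := fun k => bordB l k = true) (Nat.zero_le _) (bordB_zero l)

theorem le_lbord (l : List Char) (j : Nat) (hj : bordB l j = true) (hlt : j < l.length) :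
    j ≤ lbord l :=
  Nat.le_findGreatest (by omega) hj

-- findGreatest respects pointwise equivalence below the bound
theorem fg_congr (P Q : Nat → Prop) [DecidablePred P] [DecidablePred Q] (n : Nat)
    (h : ∀ k ≤ n, (P k ↔ Q k)) : Nat.findGreatest P n = Nat.findGreatest Q n := by
  induction n with
  | zero => rfl
  | succ n ih =>
      rw [Nat.findGreatest_succ, Nat.findGreatest_succ]
      by_cases hp : P (n + 1)
      · rw [if_pos hp, if_pos ((h _ le_rfl).mp hp)]
      · rw [if_neg hp, if_neg (fun hq => hp ((h _ le_rfl).mpr hq))]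
        exact ih (fun k hk => h k (by omega))

-- findGreatest ignores an upper region where the predicate is false
theorem fg_shrink (P : Nat → Prop) [DecidablePred P] (m n : Nat) (hnm : n ≤ m)
    (h : ∀ k, n < k → k ≤ m → ¬ P k) : Nat.findGreatest P m = Nat.findGreatest P n := by
  induction m with
  | zero => interval_cases n; rfl
  | succ m ih =>
      rcases Nat.eq_or_lt_of_le hnm with rfl | hlt
      · rfl
      · rw [Nat.findGreatest_succ, if_neg (h _ hlt le_rfl)]
        exact ih (by omega) (fun k h1 h2 => h k h1 (by omega))

-- the fall loop: from a border k of t = s.take i dominating every matching border,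
-- it reaches a state r that is still such a dominating border and satisfies the exit condition
theorem pvFall_spec (s : List Char) (pi : List Nat) (ci : Char) (i : Nat)
    (h1 : 1 ≤ i) (hi : i ≤ s.length)
    (hpi : ∀ j, j < i → pi.getD j 0 = lbord (s.take (j + 1))) :
    ∀ k, bordB (s.take i) k = true → k < i →
      (∀ m, bordB (s.take i) m = true → m < i → ci = s.getD m ' ' → m ≤ k) →
      (bordB (s.take i) (pvFall s pi ci k) = true ∧ pvFall s pi ci k < i ∧
       (∀ m, bordB (s.take i) m = true → m < i → ci = s.getD m ' ' → m ≤ pvFall s pi ci k) ∧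
       (pvFall s pi ci k = 0 ∨ ci = s.getD (pvFall s pi ci k) ' ')) := by
  intro k
  induction k using Nat.strongRecOn with
  | ind k IH =>
    intro hk hki hmax
    rw [pvFall]
    by_cases hguard : k ≠ 0 ∧ ¬ (ci = s.getD k ' ')
    · rw [if_pos hguard]
      obtain ⟨hk0, hne⟩ := hguard
      have htklen : (s.take k).length = k := by simp [List.length_take]; omega
      have hpik : pi.getD (k - 1) 0 = lbord (s.take k) := by
        have := hpi (k - 1) (by omega)
        rwa [show k - 1 + 1 = k by omega] at this
      have hlbk : lbord (s.take k) ≤ k - 1 := by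
        have := lbord_le (s.take k); omega
      have hmin : min (pi.getD (k - 1) 0) (k - 1) = lbord (s.take k) := by
        rw [hpik]; omega
      rw [hmin]
      have htk : (s.take i).take k = s.take k := by
        rw [List.take_take, min_eq_left (by omega)]
      have hb' : bordB (s.take i) (lbord (s.take k)) = true := by
        refine bord_of_take (s.take i) _ k ?_ hk
        rw [htk]; exact lbord_bord (s.take k)
      have hmax' : ∀ m, bordB (s.take i) m = true → m < i → ci = s.getD m ' ' →
          m ≤ lbord (s.take k) := by
        intro m hbm hmi hcm
        have hmk : m ≤ k := hmax m hbm hmi hcm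
        have hmk' : m < k := by
          rcases Nat.eq_or_lt_of_le hmk with rfl | h
          · exact absurd hcm hne
          · exact h
        have : bordB (s.take k) m = true := by
          rw [← htk]; exact bord_trans (s.take i) m k hmk hbm hk
        exact le_lbord (s.take k) m this (by omega)
      exact IH (lbord (s.take k)) (by omega) hb' (by omega) hmax'
    · rw [if_neg hguard]
      rw [not_and_or, not_ne_iff, not_not] at hguard
      rcases hguard with h0 | hcg
      · exact ⟨hk, hki, hmax, Or.inl h0⟩
      · exact ⟨hk, hki, hmax, Or.inr hcg⟩


-- one KMP iteration computes the longest proper border of the next prefix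
theorem kmp_step (s : List Char) (pi : List Nat) (i : Nat)
    (h1 : 1 ≤ i) (hi : i < s.length)
    (hpi : ∀ j, j < i → pi.getD j 0 = lbord (s.take (j + 1))) :
    (pvKmpFold s (pi, lbord (s.take i)) i).2 = lbord (s.take (i + 1)) := by
  have htlen : (s.take i).length = i := by simp [List.length_take]; omega
  have hstart1 : bordB (s.take i) (lbord (s.take i)) = true := lbord_bord _
  have hstart2 : lbord (s.take i) < i := by have := lbord_le (s.take i); omega
  have hstart3 : ∀ m, bordB (s.take i) m = true → m < i → s.getD i ' ' = s.getD m ' ' →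
      m ≤ lbord (s.take i) := fun m hbm hmi _ => le_lbord _ m hbm (by omega)
  obtain ⟨hr1, hr2, hr3, hr4⟩ :=
    pvFall_spec s pi (s.getD i ' ') i h1 (by omega) hpi (lbord (s.take i)) hstart1 hstart2 hstart3
  set r := pvFall s pi (s.getD i ' ') (lbord (s.take i)) with hr
  have hch : s.getD i ' ' = s[i] := List.getD_eq_getElem s ' ' hi
  have htake : s.take (i + 1) = s.take i ++ [s[i]] := by
    rw [List.take_add_one, List.getElem?_eq_getElem hi]; rfl
  have hlen1 : (s.take (i + 1)).length = i + 1 := by simp [List.length_take]; omega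
  have hgd : ∀ m (d : Char), m < i → (s.take i).getD m d = s.getD m ' ' := by
    intro m d hmi
    rw [List.getD_eq_getElem _ d (by omega : m < (s.take i).length),
      List.getD_eq_getElem s ' ' (by omega), List.getElem_take]
  show (if s.getD i ' ' = s.getD r ' ' then r + 1 else r) = lbord (s.take (i + 1))
  have hP : ∀ n, bordB (s.take (i + 1)) (n + 1)
      = (bordB (s.take i) n && ((s.take i).getD n s[i] == s[i])) := by
    intro n
    rw [htake, bordB_append]
  by_cases hc : s.getD i ' ' = s.getD r ' '
  · rw [if_pos hc]
    unfold lbord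
    rw [hlen1]
    simp only [Nat.add_sub_cancel]
    symm
    rw [Nat.findGreatest_eq_iff]
    refine ⟨by omega, fun _ => ?_, ?_⟩
    · rw [hP r, Bool.and_eq_true, beq_iff_eq]
      exact ⟨hr1, by rw [hgd r _ hr2, ← hc, hch]⟩
    · intro n hn hni hPn
      match n, hn with
      | (m + 1), _ =>
        rw [hP m, Bool.and_eq_true, beq_iff_eq] at hPn
        obtain ⟨hbm, hgm⟩ := hPn
        have hmi : m < i := by omega
        have : s.getD i ' ' = s.getD m ' ' := by rw [hch, ← hgm, hgd m _ hmi]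
        have := hr3 m hbm hmi this
        omega
  · rw [if_neg hc]
    have hr0 : r = 0 := by
      rcases hr4 with h | h
      · exact h
      · exact absurd h hc
    rw [hr0]
    unfold lbord
    rw [hlen1]
    simp only [Nat.add_sub_cancel]
    symm
    rw [Nat.findGreatest_eq_zero_iff]
    intro n hn hni hPn
    match n, hn with
    | (m + 1), _ =>
      rw [hP m, Bool.and_eq_true, beq_iff_eq] at hPn
      obtain ⟨hbm, hgm⟩ := hPn
      have hmi : m < i := by omega
      have hcm : s.getD i ' ' = s.getD m ' ' := by rw [hch, ← hgm, hgd m _ hmi]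
      have hm0 : m = 0 := by have := hr3 m hbm hmi hcm; omega
      subst hm0
      rw [← hr0] at hcm
      exact hc hcm

theorem getLastD_eq_getD (l : List Nat) (d : Nat) : l.getLastD d = l.getD (l.length - 1) d := by
  rw [List.getLastD_eq_getLast?, List.getLast?_eq_getElem?, List.getD_eq_getElem?_getD]

-- the KMP loop invariant over range' 1 m
theorem kmp_loop (s : List Char) (hs : s ≠ []) :
    ∀ m, m ≤ s.length - 1 →
      (((List.range' 1 m).foldl (pvKmpFold s) ([0], 0)).1.length = m + 1 ∧
       (∀ j, j ≤ m → ((List.range' 1 m).foldl (pvKmpFold s) ([0], 0)).1.getD j 0 = lbord (s.take (j + 1))) ∧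
       ((List.range' 1 m).foldl (pvKmpFold s) ([0], 0)).2 = lbord (s.take (m + 1))) := by
  have hlen0 : 0 < s.length := List.length_pos_iff.mpr hs
  have hone : lbord (s.take 1) = 0 := by
    unfold lbord
    rw [show (s.take 1).length - 1 = 0 from by rw [List.length_take]; omega]
    rfl
  intro m
  induction m with
  | zero =>
      intro _
      refine ⟨rfl, ?_, by simpa using hone.symm⟩
      intro j hj
      interval_cases j
      simpa using hone.symm
  | succ m ih =>
      intro hm
      obtain ⟨ih1, ih2, ih3⟩ := ih (by omega)
      have hrange : List.range' 1 (m + 1) = List.range' 1 m ++ [1 + m] := by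
        rw [List.range'_concat]; simp
      set st := (List.range' 1 m).foldl (pvKmpFold s) ([0], 0) with hst
      have hfold : (List.range' 1 (m + 1)).foldl (pvKmpFold s) ([0], 0)
          = pvKmpFold s st (1 + m) := by
        rw [hrange, List.foldl_append, List.foldl_cons, List.foldl_nil]
      have hstep : (pvKmpFold s (st.1, lbord (s.take (m + 1))) (m + 1)).2
          = lbord (s.take (m + 1 + 1)) := by
        refine kmp_step s st.1 (m + 1) (by omega) (by omega) ?_
        intro j hj
        exact ih2 j (by omega)
      have hsteq : pvKmpFold s st (1 + m) = pvKmpFold s (st.1, lbord (s.take (m + 1))) (m + 1) := by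
        rw [show (1 + m) = m + 1 by omega, ← ih3]
      have hnew1 : (pvKmpFold s st (1 + m)).1 = st.1 ++ [(pvKmpFold s st (1 + m)).2] := rfl
      refine ⟨?_, ?_, ?_⟩
      · rw [hfold, hnew1]; simp [ih1]
      · intro j hj
        rw [hfold, hnew1]
        rcases Nat.lt_or_ge j (m + 1) with hjm | hjm
        · rw [List.getD_append _ _ _ _ (by omega)]
          exact ih2 j (by omega)
        · have hj1 : j = m + 1 := by omega
          subst hj1
          rw [List.getD_append_right _ _ _ _ (by omega), ih1, Nat.sub_self]
          show (pvKmpFold s st (1 + m)).2 = _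
          rw [hsteq, hstep]
      · rw [hfold, hsteq, hstep]

theorem pvPrefixFun_last (s : List Char) (hs : s ≠ []) :
    (pvPrefixFun s).getLastD 0 = lbord s := by
  have hlen0 : 0 < s.length := List.length_pos_iff.mpr hs
  obtain ⟨h1, h2, h3⟩ := kmp_loop s hs (s.length - 1) le_rfl
  unfold pvPrefixFun
  rw [if_neg (by omega)]
  rw [getLastD_eq_getD, h1, Nat.add_sub_cancel, h2 _ le_rfl,
    show s.length - 1 + 1 = s.length from by omega, List.take_length]

-- with a sentinel absent from both sides, the longest border of a ++ sep :: b is the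
-- longest capped suffix/prefix overlap length
theorem lbord_sentinel (a b : List Char) (cap : Nat)
    (ha : a.length = cap) (hb : b.length = cap)
    (hnb : '\x00' ∉ b) :
    lbord (a ++ '\x00' :: b) =
      Nat.findGreatest (fun k => a.take k = b.drop (cap - k)) cap := by
  set s := a ++ '\x00' :: b with hs
  have slen : s.length = 2 * cap + 1 := by simp [hs, ha, hb]; omega
  have hfalse : ∀ k, cap < k → k ≤ 2 * cap → ¬ (bordB s k = true) := by
    intro k hk1 hk2 hbord
    rw [bordB_iff] at hbord
    obtain ⟨-, heq⟩ := hbord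
    have h1 : (s.take k)[cap]? = some '\x00' := by
      rw [List.getElem?_take_of_lt hk1, hs, ← ha, List.getElem?_append_right le_rfl,
        Nat.sub_self]
      rfl
    have hidx : s.length - k + cap = a.length + (2 * cap - k + 1) := by omega
    have h2 : (s.drop (s.length - k))[cap]? = b[2 * cap - k]? := by
      rw [List.getElem?_drop, hidx, hs, List.getElem?_append_right (by omega),
        Nat.add_sub_cancel_left]
      rfl
    rw [heq, h2] at h1
    have hmem : '\x00' ∈ b := by
      have hlt : 2 * cap - k < b.length := by omega
      rw [List.getElem?_eq_getElem hlt] at h1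
      have := Option.some_injective _ h1
      rw [← this]
      exact List.getElem_mem hlt
    exact hnb hmem
  have hcongr : ∀ k ≤ cap, (bordB s k = true ↔ a.take k = b.drop (cap - k)) := by
    intro k hk
    rw [bordB_iff]
    have htk : s.take k = a.take k := by
      rw [hs, List.take_append_of_le_length (by omega)]
    have hdk : s.drop (s.length - k) = b.drop (cap - k) := by
      rw [show s.length - k = a.length + (cap - k + 1) from by omega, hs,
        List.drop_append, List.drop_eq_nil_of_le (by omega), List.nil_append,
        Nat.add_sub_cancel_left, List.drop_succ_cons]
    rw [htk, hdk]
    constructor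
    · rintro ⟨-, h⟩; exact h
    · intro h; exact ⟨by omega, h⟩
  unfold lbord
  rw [show s.length - 1 = 2 * cap from by omega,
    fg_shrink _ (2 * cap) cap (by omega) hfalse]
  exact fg_congr _ _ cap hcongr

-- A's descending scan is findGreatest of the overlap predicate
theorem scanA_eq_fg (m c : String) (cap : Nat)
    (hm : cap ≤ m.toList.length) (hc : cap ≤ c.toList.length) :
    pv_find_overlap (PySem.List.pyRange (cap : Int) 0 (-1)) m c =
      ((Nat.findGreatest (fun k => c.toList.take k = m.toList.drop (m.toList.length - k)) cap : Nat) : Int) := by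
  induction cap with
  | zero =>
      rw [PySem.List.pyRange_neg_one_eq_nil (by norm_num)]
      simp [pv_find_overlap]
  | succ j ih =>
      have hcast : ((j + 1 : Nat) : Int) = (j : Int) + 1 := by push_cast; ring
      rw [hcast, PySem.List.pyRange_neg_one_cons (by positivity)]
      simp only [pv_find_overlap]
      have hlt : (c.toList.take (j + 1)).length = j + 1 := by
        rw [List.length_take]; omega
      have hcond : PySem.Str.endswith m (PySem.Str.slice c none (some ((j : Int) + 1))) = true
          ↔ c.toList.take (j + 1) = m.toList.drop (m.toList.length - (j + 1)) := by
        rw [← hcast]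
        simp only [PySem.Str.endswith_eq, PySem.Str.toList_slice, PySem.Chars.slice_eq_listSlice,
          PySem.List.slice_to_natCast, PySem.Chars.endswith_iff]
        rw [List.suffix_iff_eq_drop, hlt]
      rw [Nat.findGreatest_succ]
      by_cases h : c.toList.take (j + 1) = m.toList.drop (m.toList.length - (j + 1))
      · rw [if_pos (hcond.mpr h), if_pos h, hcast]
      · rw [if_neg (fun hend => h (hcond.mp hend)), if_neg h,
          show ((j : Int) + 1 - 1) = (j : Int) from by ring]
        exact ih (by omega) (by omega)

theorem dom_ne_nul (ch : Char) (h : pvDomChar ch = true) : ch ≠ '\x00' := by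
  intro hch; subst hch; exact absurd h (by decide)

theorem strip_mem (l : List Char) (ch : Char) (h : ch ∈ PySem.Chars.strip l) : ch ∈ l := by
  simp only [PySem.Chars.strip, PySem.Chars.rstrip, PySem.Chars.lstrip, List.mem_reverse] at h
  have h1 := (List.dropWhile_sublist _).subset h
  rw [List.mem_reverse] at h1
  exact (List.dropWhile_sublist _).subset h1

-- the two step functions agree when the accumulated string is sentinel-free
theorem step_eq (m p : String)
    (hm : ∀ ch ∈ m.toList, pvDomChar ch = true) :
    pv_merge_step m p = pv_merge_step_alt m p := by
  by_cases h0 : PySem.Str.strip p = ""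
  · simp [pv_merge_step, pv_merge_step_alt, h0]
  · rw [pv_merge_step, pv_merge_step_alt]
    simp only [h0, ite_false]
    set cand := PySem.Str.strip p with hcand
    set cl := cand.toList with hcld
    set ml := m.toList with hmld
    set capN : Nat := min (min ml.length cl.length) (200 * 2) with hcap
    have hcapm : capN ≤ ml.length := by omega
    have hcapc : capN ≤ cl.length := by omega
    have hml_len : ml.length = m.length := by rw [hmld, String.length_toList]
    have hcl_len : cl.length = cand.length := by rw [hcld, String.length_toList]
    have hmaxeq : min (min ((m.length : Int)) ((cand.length : Int))) (200 * 2)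
        = ((capN : Nat) : Int) := by
      rw [hcap, ← hml_len, ← hcl_len]
      push_cast
      rfl
    rw [hmaxeq, scanA_eq_fg m cand capN hcapm hcapc]
    set bs := cl.take capN ++ '\x00' :: ml.drop (ml.length - capN) with hbs
    have hbsne : bs ≠ [] := by simp [hbs]
    have hnul_ml : '\x00' ∉ ml := fun hmem => dom_ne_nul _ (hm _ hmem) rfl
    have hover : (pvPrefixFun bs).getLastD 0
        = Nat.findGreatest (fun k => cl.take k = ml.drop (ml.length - k)) capN := by
      rw [pvPrefixFun_last bs hbsne, hbs,
        lbord_sentinel _ _ capN (by rw [List.length_take]; omega)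
          (by rw [List.length_drop]; omega)
          (fun h => hnul_ml ((List.drop_sublist _ _).subset h))]
      apply fg_congr
      intro k hk
      rw [List.take_take, min_eq_left hk, List.drop_drop,
        show (ml.length - capN) + (capN - k) = ml.length - k from by omega]
    rw [hover]
    have hslice : ∀ K : Nat, PySem.Str.slice cand (some ((K : Nat) : Int)) none
        = String.ofList (cl.drop K) := by
      intro K
      rw [PySem.Str.slice]
      rw [PySem.Chars.slice_eq_listSlice, PySem.List.slice_from_natCast]
    rw [hslice]

theorem step_alt_dom (m p : String)
    (hm : ∀ ch ∈ m.toList, pvDomChar ch = true)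
    (hp : ∀ ch ∈ p.toList, pvDomChar ch = true) :
    ∀ ch ∈ (pv_merge_step_alt m p).toList, pvDomChar ch = true := by
  intro ch hch
  by_cases h0 : PySem.Str.strip p = ""
  · rw [pv_merge_step_alt] at hch
    simp only [h0, ite_true] at hch
    exact hm ch hch
  · rw [pv_merge_step_alt] at hch
    simp only [h0, ite_false] at hch
    rw [String.toList_append, String.toList_ofList] at hch
    rcases List.mem_append.mp hch with h | h
    · exact hm ch h
    · have h1 := (List.drop_sublist _ _).subset h
      rw [PySem.Str.toList_strip] at h1
      exact hp ch (strip_mem _ _ h1)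

set_option maxHeartbeats 1000000 in
theorem fold_eq (rest : List String) (acc : String)
    (hacc : ∀ ch ∈ acc.toList, pvDomChar ch = true)
    (hrest : ∀ p ∈ rest, pvDomStr p = true) :
    rest.foldl pv_merge_step acc = rest.foldl pv_merge_step_alt acc := by
  induction rest generalizing acc with
  | nil => rfl
  | cons a t ih =>
      have ha : ∀ ch ∈ a.toList, pvDomChar ch = true := by
        have := hrest a (by simp)
        simpa [pvDomStr, List.all_eq_true] using this
      rw [List.foldl_cons, List.foldl_cons, step_eq acc a hacc]
      exact ih (pv_merge_step_alt acc a) (step_alt_dom acc a hacc ha)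
        (fun p hpmem => hrest p (by simp [hpmem]))

-- ===== VERDICT (by name: the statement is the Claim_ definition above) =====
theorem merge_chunk_sequence_py_spec : Claim_equal_merge_chunk_sequence_py := by
  intro chunks hdom
  show merge_chunk_sequence_py chunks = merge_chunk_sequence_py_alt chunks
  cases chunks with
  | nil => rfl
  | cons c0 rest =>
      have hall : ∀ q ∈ (c0 :: rest), pvDomStr q = true := by
        unfold Dom_merge_chunk_sequence_py at hdom
        rw [List.all_eq_true] at hdom
        exact hdom
      have hacc : ∀ ch ∈ (PySem.Str.strip c0).toList, pvDomChar ch = true := by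
        intro ch hch
        rw [PySem.Str.toList_strip] at hch
        have h1 := strip_mem _ _ hch
        have := hall c0 (by simp)
        rw [pvDomStr, List.all_eq_true] at this
        exact this ch h1
      show PySem.Str.strip (rest.foldl pv_merge_step (PySem.Str.strip c0))
          = PySem.Str.strip (rest.foldl pv_merge_step_alt (PySem.Str.strip c0))
      rw [fold_eq rest (PySem.Str.strip c0) hacc (fun q hq => hall q (by simp [hq]))]
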